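-- pv_equiv track=rewrite | github.com/attilaolah/math | py/poly/int_t.py | _smap
-- ===== SOURCE A (Python) =====
-- def _smap(ind: int, chars: str) -> str:
--     """Turn ind into a Unicode subscript or superscript string."""
--     abs_x, ret = abs(ind), ''
--     while abs_x:
--         ret = chars[abs_x % 10] + ret
--         abs_x //= 10
--     if ind < 0:
--         ret = chars[10] + ret
--     return ret
-- ===== SOURCE B (Python) =====
-- def _smap(ind: int, chars: str) -> str:
--     """Turn ind into a Unicode subscript or superscript string."""
--     if ind == 0:
--         return ''
--     sign = chars[10] if ind < 0 else ''
--     return sign + ''.join(chars[int(c)] for c in str(abs(ind)))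
-- ===== Notes on version B (the rewrite author's own statement) =====
-- stated objective: idiomatic
-- what changed: B builds the result by mapping each character of str(abs(ind)) to its lookup chars[int(c)] and joining, with the sign prefix computed up front, instead of A's %10-//10 loop that prepends digits back-to-front.
import Mathlib
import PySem

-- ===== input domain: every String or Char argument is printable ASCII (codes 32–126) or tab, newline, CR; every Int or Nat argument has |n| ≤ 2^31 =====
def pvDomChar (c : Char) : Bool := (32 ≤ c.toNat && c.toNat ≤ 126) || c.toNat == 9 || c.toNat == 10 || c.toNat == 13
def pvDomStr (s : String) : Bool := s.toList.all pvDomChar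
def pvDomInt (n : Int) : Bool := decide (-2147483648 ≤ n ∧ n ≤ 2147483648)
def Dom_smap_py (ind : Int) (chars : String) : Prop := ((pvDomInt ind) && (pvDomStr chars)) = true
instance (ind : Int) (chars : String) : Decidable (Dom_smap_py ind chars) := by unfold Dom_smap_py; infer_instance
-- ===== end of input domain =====

-- B replaces A's %10 // 10 prepend loop by mapping str(abs(ind)) through chars[int(c)] with the
-- sign prefix computed first (idiomatic; same cost).

-- ===== PORT A =====
-- the while loop: ret = chars[abs_x % 10] + ret; abs_x //= 10
def smapLoopA (chars : List Char) (absx : Nat) (ret : List Char) : List Char :=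
  if absx = 0 then ret
  else smapLoopA chars (absx / 10) (((PySem.List.pyGet? chars ((absx % 10 : Nat) : Int)).getD ' ') :: ret)
  decreasing_by exact Nat.div_lt_self (Nat.pos_of_ne_zero (by assumption)) (by omega)

def smap_py (ind : Int) (chars : String) : String :=
  let ret := smapLoopA chars.toList ind.natAbs []
  let ret := if ind < 0 then ((PySem.List.pyGet? chars.toList (10 : Int)).getD ' ') :: ret else ret
  String.ofList ret

-- ===== PORT B =====
def smap_py_alt (ind : Int) (chars : String) : String :=
  if ind = 0 then "" else
  let sign : List Char :=
    if ind < 0 then [(PySem.List.pyGet? chars.toList (10 : Int)).getD ' '] else []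
  String.ofList (sign ++ (PySem.Int.toStr |ind|).toList.map
    (fun c => (PySem.List.pyGet? chars.toList ((PySem.Int.ofStr? (String.ofList [c])).getD 0)).getD ' '))

-- ===== PRECONDITION & SPEC =====
-- exactly the inputs on which Python A returns (no IndexError): every decimal digit of |ind|
-- indexes into chars, and the sign character chars[10] exists when ind < 0
def Pre_smap_py (ind : Int) (chars : String) : Prop :=
  (∀ d ∈ Nat.digits 10 ind.natAbs, d < chars.toList.length) ∧
  (ind < 0 → 10 < chars.toList.length)
instance (ind : Int) (chars : String) : Decidable (Pre_smap_py ind chars) := by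
  unfold Pre_smap_py; infer_instance
def pvWitness_smap_py : Int × String := (-42, "0123456789-")

def Spec_smap_py (ind : Int) (chars : String) (out : String) : Prop := out = smap_py_alt ind chars
instance (ind : Int) (chars : String) (out : String) : Decidable (Spec_smap_py ind chars out) := by
  unfold Spec_smap_py; infer_instance

-- ===== CLAIM (what is proved, stated in full; the proofs are below) =====
def Claim_equal_smap_py : Prop := ∀ (ind : Int) (chars : String), Dom_smap_py ind chars → Pre_smap_py ind chars → Spec_smap_py ind chars (smap_py ind chars)

-- ===== LEMMAS AND PROOFS =====

-- big-endian decimal digit values of n (n = 0 gives [0], like str)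
def decDigits (n : Nat) : List Nat :=
  if n < 10 then [n] else decDigits (n / 10) ++ [n % 10]
  decreasing_by exact Nat.div_lt_self (by omega) (by omega)

theorem decDigits_lt (n : Nat) : ∀ d ∈ decDigits n, d < 10 := by
  induction n using Nat.strong_induction_on with
  | _ n ih =>
    rw [decDigits]
    split
    · intro d hd; simp at hd; omega
    · intro d hd
      simp only [List.mem_append, List.mem_singleton] at hd
      rcases hd with h | h
      · exact ih (n / 10) (Nat.div_lt_self (by omega) (by omega)) d h
      · omega

theorem toDigitsCore_step (fuel n : Nat) (ds : List Char) :
    Nat.toDigitsCore 10 (fuel + 1) n ds =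
      if n / 10 = 0 then (n % 10).digitChar :: ds
      else Nat.toDigitsCore 10 fuel (n / 10) ((n % 10).digitChar :: ds) := rfl

theorem toDigitsCore_eq (fuel : Nat) : ∀ (n : Nat) (l : List Char), n ≤ fuel →
    Nat.toDigitsCore 10 (fuel + 1) n l = (decDigits n).map Nat.digitChar ++ l := by
  induction fuel with
  | zero =>
    intro n l hn
    interval_cases n
    simp [toDigitsCore_step, decDigits]
  | succ f ih =>
    intro n l hn
    rw [decDigits, toDigitsCore_step]
    by_cases h : n < 10
    · rw [if_pos (Nat.div_eq_of_lt h), if_pos h]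
      simp [Nat.mod_eq_of_lt h]
    · have hne : ¬ n / 10 = 0 := by omega
      rw [if_neg hne, if_neg h, ih (n / 10) _ (by omega)]
      simp

theorem toDigits_eq_decDigits (n : Nat) :
    Nat.toDigits 10 n = (decDigits n).map Nat.digitChar := by
  have := toDigitsCore_eq n n [] le_rfl
  simpa [Nat.toDigits] using this

theorem smapLoopA_eq (chars : List Char) (n : Nat) (hn : n ≠ 0) : ∀ ret : List Char,
    smapLoopA chars n ret =
      (decDigits n).map (fun d => (PySem.List.pyGet? chars ((d : Nat) : Int)).getD ' ') ++ ret := by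
  induction n using Nat.strong_induction_on with
  | _ n ih =>
    intro ret
    rw [smapLoopA, if_neg hn, decDigits]
    by_cases h : n < 10
    · have h10 : n / 10 = 0 := Nat.div_eq_of_lt h
      rw [h10, smapLoopA]
      simp [Nat.mod_eq_of_lt h, h]
    · rw [if_neg h,
        ih (n / 10) (Nat.div_lt_self (by omega) (by omega)) (by omega)]
      simp only [List.map_append, List.map_cons, List.map_nil, List.append_assoc,
        List.cons_append, List.nil_append]

-- each digit char round-trips through int(c) to its value
theorem ofStr?_digitChar (d : Nat) (hd : d < 10) :
    PySem.Int.ofStr? (String.ofList [Nat.digitChar d]) = some (d : Int) := by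
  interval_cases d <;> decide

-- ===== VERDICT (by name: the statement is the Claim_ definition above) =====

theorem smap_py_spec : Claim_equal_smap_py := by
  intro ind chars _ _
  show smap_py ind chars = smap_py_alt ind chars
  by_cases h0 : ind = 0
  · subst h0
    rw [smap_py, smap_py_alt]
    simp [smapLoopA]
  · have hn : ind.natAbs ≠ 0 := by
      simpa [Int.natAbs_eq_zero] using h0
    have htoStr : (PySem.Int.toStr (ind.natAbs : Int)).toList
        = (decDigits ind.natAbs).map Nat.digitChar := by
      rw [PySem.Int.toList_toStr, PySem.Int.toChars,
        if_neg (by omega), toDigits_eq_decDigits, Int.toNat_natCast]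
    rw [smap_py, smap_py_alt, if_neg h0, Int.abs_eq_natAbs]
    simp only [htoStr, List.map_map, smapLoopA_eq chars.toList ind.natAbs hn,
      List.append_nil]
    congr 1
    have hmap : List.map ((fun c => (PySem.List.pyGet? chars.toList
          ((PySem.Int.ofStr? (String.ofList [c])).getD 0)).getD ' ') ∘ Nat.digitChar)
        (decDigits ind.natAbs)
        = List.map (fun d => (PySem.List.pyGet? chars.toList ((d : Nat) : Int)).getD ' ')
          (decDigits ind.natAbs) := by
      apply List.map_congr_left
      intro d hd
      have hd10 : d < 10 := decDigits_lt _ d hd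
      simp [Function.comp, ofStr?_digitChar d hd10]
    by_cases hneg : ind < 0
    · rw [if_pos hneg, if_pos hneg, List.singleton_append, hmap]
    · rw [if_neg hneg, if_neg hneg, List.nil_append, hmap]
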